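-- pv_equiv track=rewrite | github.com/KULeuven-COSIC/Double-Trouble | sw/basic/scripts/policy.py | calculate_QUAD2
-- ===== SOURCE A (Python) =====
-- def calculate_QUAD2(accessPattern, accessPatternLen):
--
--   lru_index  = 0
--   ways = [' ', ' ']
--   ages = [None, None]
--
--   INSERTION_AGE = 2
--   EVICTION_AGE = 3
--
--   for i in range(accessPatternLen):
--
--     # If the access is cached, decrease its age
--     if ways[0] == accessPattern[i]:
--       ages[0] = max(0, ages[0]-1)
--       lru_index = 1
--     elif ways[1] == accessPattern[i]:
--       ages[1] = max(0, ages[1]-1)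
--       lru_index = 0
--     else:
--
--         # If there is an empty way, introduce with age 2
--         if ages[0] is None:
--           ways[0] = accessPattern[i]
--           ages[0] = INSERTION_AGE
--           lru_index = 1
--         elif ages[1] is None:
--           ways[1] = accessPattern[i]
--           ages[1] = INSERTION_AGE
--           lru_index = 0
--
--         else: # Look for eviction candidate
--           found = False
--           while not found:
--             if (EVICTION_AGE not in ages):
--               ages[0] += 1
--               ages[1] += 1
--             else:
--               if ages[0] == EVICTION_AGE and ages[1] == EVICTION_AGE:
--                 if lru_index == 0:
--                   ways[0] = accessPattern[i]
--                   ages[0] = INSERTION_AGE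
--                   lru_index = 1
--                 else:
--                   ways[1] = accessPattern[i]
--                   ages[1] = INSERTION_AGE
--                   lru_index = 0
--               elif ages[0] == EVICTION_AGE:
--                 ways[0] = accessPattern[i]
--                 ages[0] = INSERTION_AGE
--                 lru_index = 1
--               else:
--                 ways[1] = accessPattern[i]
--                 ages[1] = INSERTION_AGE
--                 lru_index = 0
--               found = True
--   return ways
-- ===== SOURCE B (Python) =====
-- def calculate_QUAD2(accessPattern, accessPatternLen):
--     # Table-driven finite automaton: the control state (age0, age1, lru) ranges over a
--     # small finite set, so all miss/fill transitions are precomputed once into a dict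
--     # and each access becomes a classification plus a table lookup -- no eviction logic
--     # in the loop at all.  Hit ageing is a literal lookup table DEC.
--     AGES = (None, 0, 1, 2, 3)
--     DEC = {0: 0, 1: 0, 2: 1, 3: 2}
--     MISS = {}
--     for a0 in AGES:
--         for a1 in AGES:
--             for lru in (0, 1):
--                 if a0 is None:                      # fill empty way 0
--                     MISS[(a0, a1, lru)] = (0, 2, a1, 1)
--                 elif a1 is None:                    # fill empty way 1
--                     MISS[(a0, a1, lru)] = (1, a0, 2, 0)
--                 else:                               # evict the older way (tie: lru)
--                     top = max(a0, a1)
--                     v = lru if a0 == a1 else (0 if a0 == top else 1)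
--                     if v == 0:
--                         MISS[(a0, a1, lru)] = (0, 2, a1 + 3 - top, 1)
--                     else:
--                         MISS[(a0, a1, lru)] = (1, a0 + 3 - top, 2, 0)
--     ways = [' ', ' ']
--     a0, a1, lru = None, None, 0
--     for i in range(accessPatternLen):
--         x = accessPattern[i]
--         if ways[0] == x:
--             a0, lru = DEC[a0], 1
--         elif ways[1] == x:
--             a1, lru = DEC[a1], 0
--         else:
--             v, a0, a1, lru = MISS[(a0, a1, lru)]
--             ways[v] = x
--     return ways
-- ===== Notes on version B (the rewrite author's own statement) =====
-- stated objective: alternative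
-- what changed: B replaces A's branchy simulation with its inner `while not found` eviction loop by a table-driven finite automaton: the finite control state (age0, age1, lru) is enumerated up front into a precomputed transition dict MISS (and a literal hit-ageing table DEC), so each access is a classification plus one dictionary lookup instead of eviction logic.
import Mathlib
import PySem

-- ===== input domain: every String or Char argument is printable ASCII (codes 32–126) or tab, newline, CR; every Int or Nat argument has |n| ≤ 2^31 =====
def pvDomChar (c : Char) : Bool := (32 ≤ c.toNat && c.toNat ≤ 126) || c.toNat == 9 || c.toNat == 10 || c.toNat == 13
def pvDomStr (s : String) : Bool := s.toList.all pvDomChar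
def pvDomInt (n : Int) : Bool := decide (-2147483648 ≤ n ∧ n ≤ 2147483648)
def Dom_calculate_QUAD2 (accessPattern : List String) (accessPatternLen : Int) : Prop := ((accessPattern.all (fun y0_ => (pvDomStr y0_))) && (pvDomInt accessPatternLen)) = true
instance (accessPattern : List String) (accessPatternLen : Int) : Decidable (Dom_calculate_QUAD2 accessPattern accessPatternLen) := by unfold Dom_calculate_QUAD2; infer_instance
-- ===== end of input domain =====

-- B replaces A's branchy per-access simulation with its inner eviction while-loop by a
-- table-driven finite automaton over the control state (age0, age1, lru) (objective:
-- alternative).  Equivalence is over the return value; both Pythons raise on the same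
-- inputs, excluded by Pre_.

-- Cache state: two ways with their ages (none = empty way) and the LRU pointer.
structure QSt where
  w0 : String
  w1 : String
  a0 : Option Int
  a1 : Option Int
  lru : Int
deriving DecidableEq, Repr

-- ===== PORT A =====

-- Python's `ages[j] = max(0, ages[j]-1)`; on a None age Python raises TypeError
-- (excluded by Pre_), the port leaves the age unchanged there.
def pvDecAge (a : Option Int) : Option Int := a.map (fun v => max 0 (v - 1))

-- A's inner `while not found` eviction loop.  In Python it terminates because the
-- (always `some`) ages stay in [0,3]; the fuel argument is only a totality guard
-- (fuel 8 is never exhausted on reachable states).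
def pvEvictLoopA (fuel : Nat) (x w0 w1 : String) (a0 a1 lru : Int) : QSt :=
  match fuel with
  | 0 => ⟨w0, w1, some a0, some a1, lru⟩
  | fuel + 1 =>
    if ¬ (a0 = 3 ∨ a1 = 3) then  -- EVICTION_AGE not in ages
      pvEvictLoopA fuel x w0 w1 (a0 + 1) (a1 + 1) lru
    else if a0 = 3 ∧ a1 = 3 then
      if lru = 0 then ⟨x, w1, some 2, some a1, 1⟩ else ⟨w0, x, some a0, some 2, 0⟩
    else if a0 = 3 then ⟨x, w1, some 2, some a1, 1⟩
    else ⟨w0, x, some a0, some 2, 0⟩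

-- one iteration of A's `for i in range(accessPatternLen)` body, given x = accessPattern[i].
def pvStepAx (x : String) (s : QSt) : QSt :=
  if s.w0 = x then { s with a0 := pvDecAge s.a0, lru := 1 }
  else if s.w1 = x then { s with a1 := pvDecAge s.a1, lru := 0 }
  else match s.a0, s.a1 with
    | none, _ => ⟨x, s.w1, some 2, s.a1, 1⟩
    | some a0, none => ⟨s.w0, x, some a0, some 2, 0⟩
    | some a0, some a1 => pvEvictLoopA 8 x s.w0 s.w1 a0 a1 s.lru

-- x = accessPattern[i]; an out-of-range index raises IndexError in Python
-- (excluded by Pre_), the port reads "".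
def pvStepA (ap : List String) (s : QSt) (i : Int) : QSt :=
  pvStepAx ((PySem.List.pyGet? ap i).getD "") s

def calculate_QUAD2 (accessPattern : List String) (accessPatternLen : Int) : List String :=
  let s := (PySem.List.pyRange 0 accessPatternLen 1).foldl (pvStepA accessPattern) ⟨" ", " ", none, none, 0⟩
  [s.w0, s.w1]

-- ===== PORT B =====

-- B's literal hit-ageing table DEC = {0: 0, 1: 0, 2: 1, 3: 2}.
def pvDecTable : PySem.Dict Int Int := PySem.Dict.ofList [(0, 0), (1, 0), (2, 1), (3, 2)]

-- DEC[a]; a None age is a KeyError in Python B (a TypeError in A; excluded by Pre_),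
-- the port yields none there.
def pvDec (a : Option Int) : Option Int := a.bind (fun v => pvDecTable.get? v)

-- B's precomputed miss/fill transition table, built by the same triple loop as Source B:
-- key (age0, age1, lru) ↦ (victim way, new age0, new age1, new lru).
def pvMissTable : PySem.Dict (Option Int × Option Int × Int) (Int × Option Int × Option Int × Int) :=
  ([none, some 0, some 1, some 2, some 3] : List (Option Int)).foldl (fun d a0 =>
    ([none, some 0, some 1, some 2, some 3] : List (Option Int)).foldl (fun d a1 =>
      ([0, 1] : List Int).foldl (fun d lru =>
        d.insert (a0, a1, lru)
          (match a0, a1 with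
           | none, _ => (0, some 2, a1, 1)
           | some x0, none => (1, some x0, some 2, 0)
           | some x0, some x1 =>
             let top := max x0 x1
             let v := if x0 = x1 then lru else if x0 = top then 0 else 1
             if v = 0 then (0, some 2, some (x1 + 3 - top), 1)
             else (1, some (x0 + 3 - top), some 2, 0))) d) d) PySem.Dict.empty

-- one iteration of B's loop body; a missing MISS key is a KeyError in Python
-- (unreachable: lru stays in {0,1} and stored ages in the table's range),
-- the port leaves the state unchanged there.
def pvStepBx (x : String) (s : QSt) : QSt :=
  if s.w0 = x then { s with a0 := pvDec s.a0, lru := 1 }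
  else if s.w1 = x then { s with a1 := pvDec s.a1, lru := 0 }
  else match pvMissTable.get? (s.a0, s.a1, s.lru) with
    | some (v, a0', a1', lru') =>
        if v = 0 then ⟨x, s.w1, a0', a1', lru'⟩ else ⟨s.w0, x, a0', a1', lru'⟩
    | none => s

def pvStepB (ap : List String) (s : QSt) (i : Int) : QSt :=
  pvStepBx ((PySem.List.pyGet? ap i).getD "") s

def calculate_QUAD2_alt (accessPattern : List String) (accessPatternLen : Int) : List String :=
  let s := (PySem.List.pyRange 0 accessPatternLen 1).foldl (pvStepB accessPattern) ⟨" ", " ", none, none, 0⟩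
  [s.w0, s.w1]

-- ===== PRECONDITION & SPEC =====
-- Pre_ excludes exactly the inputs where Python A raises: an index beyond the list
-- (IndexError), and an access " " made while a way is still empty — it matches the
-- ' '-initialised way whose age is None and `None - 1` raises TypeError; a way is
-- still empty at step i iff fewer than 2 distinct values occur before i.
def Pre_calculate_QUAD2 (accessPattern : List String) (accessPatternLen : Int) : Prop :=
  accessPatternLen ≤ (accessPattern.length : Int) ∧
  ∀ i : Nat, i < accessPatternLen.toNat →
    accessPattern.getD i "" = " " → 2 ≤ ((accessPattern.take i).dedup).length
instance (accessPattern : List String) (accessPatternLen : Int) : Decidable (Pre_calculate_QUAD2 accessPattern accessPatternLen) := by unfold Pre_calculate_QUAD2; infer_instance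

def pvWitness_calculate_QUAD2 : List String × Int := (["a", "b", "a", "c", "b"], 5)

def Spec_calculate_QUAD2 (accessPattern : List String) (accessPatternLen : Int) (out : List String) : Prop := out = calculate_QUAD2_alt accessPattern accessPatternLen
instance (accessPattern : List String) (accessPatternLen : Int) (out : List String) : Decidable (Spec_calculate_QUAD2 accessPattern accessPatternLen out) := by unfold Spec_calculate_QUAD2; infer_instance

-- ===== CLAIM (what is proved, stated in full; the proofs are below) =====
def Claim_equal_calculate_QUAD2 : Prop := ∀ (accessPattern : List String) (accessPatternLen : Int), Dom_calculate_QUAD2 accessPattern accessPatternLen → Pre_calculate_QUAD2 accessPattern accessPatternLen → Spec_calculate_QUAD2 accessPattern accessPatternLen (calculate_QUAD2 accessPattern accessPatternLen)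

-- ===== LEMMAS AND PROOFS =====

-- invariant: stored ages are in [0,3] and the LRU pointer is a way index
def pvOkAge (a : Option Int) : Prop := ∀ v ∈ a, 0 ≤ v ∧ v ≤ 3
def pvInv (s : QSt) : Prop := pvOkAge s.a0 ∧ pvOkAge s.a1 ∧ (s.lru = 0 ∨ s.lru = 1)

-- closed form of the lookup in B's precomputed table (proof helper only)
def pvMissSpec (a0 a1 : Option Int) (lru : Int) : Int × Option Int × Option Int × Int :=
  match a0, a1 with
  | none, _ => (0, some 2, a1, 1)
  | some x0, none => (1, some x0, some 2, 0)
  | some x0, some x1 =>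
    let top := max x0 x1
    let v := if x0 = x1 then lru else if x0 = top then 0 else 1
    if v = 0 then (0, some 2, some (x1 + 3 - top), 1)
    else (1, some (x0 + 3 - top), some 2, 0)

set_option maxRecDepth 16384 in
theorem pvMissTable_get?_spec (a0 a1 : Option Int) (lru : Int)
    (h0 : pvOkAge a0) (h1 : pvOkAge a1) (hl : lru = 0 ∨ lru = 1) :
    pvMissTable.get? (a0, a1, lru) = some (pvMissSpec a0 a1 lru) := by
  rcases hl with hl | hl <;> subst hl <;>
  · cases a0 with
    | none =>
      cases a1 with
      | none => decide
      | some v1 =>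
        obtain ⟨l1, u1⟩ := h1 v1 rfl
        interval_cases v1 <;> decide
    | some v0 =>
      obtain ⟨l0, u0⟩ := h0 v0 rfl
      cases a1 with
      | none => interval_cases v0 <;> decide
      | some v1 =>
        obtain ⟨l1, u1⟩ := h1 v1 rfl
        interval_cases v0 <;> interval_cases v1 <;> decide

set_option maxRecDepth 4096 in
theorem pvStep_eq (x : String) (s : QSt) (h : pvInv s) :
    pvStepAx x s = pvStepBx x s := by
  obtain ⟨h0, h1, hl⟩ := h
  obtain ⟨w0, w1, a0, a1, lru⟩ := s
  dsimp only at *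
  unfold pvStepAx pvStepBx
  dsimp only
  split_ifs
  · congr 1
    cases a0 with
    | none => rfl
    | some v =>
      obtain ⟨lv, uv⟩ := h0 v rfl
      interval_cases v <;> rfl
  · congr 1
    cases a1 with
    | none => rfl
    | some v =>
      obtain ⟨lv, uv⟩ := h1 v rfl
      interval_cases v <;> rfl
  · rw [pvMissTable_get?_spec a0 a1 lru h0 h1 hl]
    rcases hl with hl | hl <;> subst hl <;>
    · cases a0 with
      | none =>
        cases a1 with
        | none => rfl
        | some v1 => obtain ⟨l1, u1⟩ := h1 v1 rfl; interval_cases v1 <;> rfl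
      | some v0 =>
        obtain ⟨l0, u0⟩ := h0 v0 rfl
        cases a1 with
        | none => interval_cases v0 <;> rfl
        | some v1 =>
          obtain ⟨l1, u1⟩ := h1 v1 rfl
          interval_cases v0 <;> interval_cases v1 <;> rfl

set_option maxRecDepth 4096 in
theorem pvStepB_inv (x : String) (s : QSt) (h : pvInv s) :
    pvInv (pvStepBx x s) := by
  obtain ⟨h0, h1, hl⟩ := h
  obtain ⟨w0, w1, a0, a1, lru⟩ := s
  dsimp only at *
  unfold pvStepBx
  dsimp only
  split_ifs
  · refine ⟨?_, h1, Or.inr rfl⟩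
    cases a0 with
    | none => simp [pvDec, pvOkAge]
    | some v =>
      obtain ⟨lv, uv⟩ := h0 v rfl
      interval_cases v <;> simp [pvDec, pvDecTable, pvOkAge, PySem.Dict.ofList] <;> decide
  · refine ⟨h0, ?_, Or.inl rfl⟩
    cases a1 with
    | none => simp [pvDec, pvOkAge]
    | some v =>
      obtain ⟨lv, uv⟩ := h1 v rfl
      interval_cases v <;> simp [pvDec, pvDecTable, pvOkAge, PySem.Dict.ofList] <;> decide
  · rw [pvMissTable_get?_spec a0 a1 lru h0 h1 hl]
    rcases hl with hl | hl <;> subst hl <;>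
    · cases a0 with
      | none =>
        cases a1 with
        | none => simp [pvMissSpec, pvInv, pvOkAge]
        | some v1 =>
          obtain ⟨l1, u1⟩ := h1 v1 rfl
          interval_cases v1 <;> simp [pvMissSpec, pvInv, pvOkAge]
      | some v0 =>
        obtain ⟨l0, u0⟩ := h0 v0 rfl
        cases a1 with
        | none => interval_cases v0 <;> simp [pvMissSpec, pvInv, pvOkAge]
        | some v1 =>
          obtain ⟨l1, u1⟩ := h1 v1 rfl
          interval_cases v0 <;> interval_cases v1 <;> simp [pvMissSpec, pvInv, pvOkAge]

set_option maxRecDepth 16384 in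
theorem pvFold_eq (ap : List String) (l : List Int) (s : QSt) (h : pvInv s) :
    l.foldl (pvStepA ap) s = l.foldl (pvStepB ap) s := by
  induction l generalizing s with
  | nil => rfl
  | cons i l ih =>
    simp only [List.foldl_cons]
    rw [show pvStepA ap s i = pvStepBx ((PySem.List.pyGet? ap i).getD "") s from pvStep_eq _ s h]
    exact ih _ (pvStepB_inv _ s h)

-- ===== VERDICT (by name: the statement is the Claim_ definition above) =====
theorem calculate_QUAD2_spec : Claim_equal_calculate_QUAD2 := by
  intro ap n _ _
  unfold Spec_calculate_QUAD2 calculate_QUAD2 calculate_QUAD2_alt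
  rw [pvFold_eq ap _ _ ⟨by simp [pvOkAge], by simp [pvOkAge], Or.inl rfl⟩]
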